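-- pv_equiv track=rewrite | github.com/stepleton/5100NonExecutableROSDecode | binary_check.py | update_crc
-- ===== SOURCE A (Python) =====
-- from typing import Tuple
--
-- def update_crc(byte: int, crc: Tuple[int, int]) -> Tuple[int, int]:
--   """Update a 16-bit CRC given a new byte."""
--   # Set up the 16 registers of the 5100.
--   r = [(0, 0) for _ in range(16)]
--   r[9] = (crc[0] & 0xff, crc[1] & 0xff)
--   r[10] = (0, byte & 0xff)
--
--   # MHL R14, R9
--   r[14] = (r[14][0], r[9][0])
--
--   # XOR R14, R10
--   r[14] = (r[14][0], r[14][1] ^ r[10][1])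
--
--   # MOVE R1, R14
--   r[1] = r[14]
--
--   # MOVE R15, R14
--   r[15] = r[14]
--
--   # SWAP R15
--   r[15] = (r[15][0], (r[15][1] << 4 & 0xff) | (r[15][1] >> 4))
--
--   # XOR R14, R15
--   r[14] = (r[14][0], r[14][1] ^ r[15][1])
--
--   # CLR R14, #$0F
--   r[14] = (r[14][0], r[14][1] & 0xf0)
--
--   # XOR R14, R9
--   r[14] = (r[14][0], r[14][1] ^ r[9][1])
--
--   # MOVE R9, R1
--   r[9] = r[1]
--
--   # CLR R15, #$F0
--   r[15] = (r[15][0], r[15][1] & 0x0f)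
--
--   # XOR R9, R15
--   r[9] = (r[9][0], r[9][1] ^ r[15][1])
--
--   # ROR3 R1
--   r[1] = (r[1][0], (r[1][1] << 5 & 0xff) | (r[1][1] >> 3))
--
--   # MOVE R15, R1
--   r[15] = r[1]
--
--   # CLR R15, #$E0
--   r[15] = (r[15][0], r[15][1] & 0x1f)
--
--   # XOR R14, R15
--   r[14] = (r[14][0], r[14][1] ^ r[15][1])
--
--   # CLR R1, #$1F
--   r[1] = (r[1][0], r[1][1] & 0xe0)
--
--   # XOR R9, R1
--   r[9] = (r[9][0], r[9][1] ^ r[1][1])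
--
--   # SWAP R15
--   r[15] = (r[15][0], (r[15][1] << 4 & 0xff) | (r[15][1] >> 4))
--
--   # MOVE R1, R15
--   r[1] = r[15]
--
--   # CLR R15, #$1F
--   r[15] = (r[15][0], r[15][1] & 0xe0)
--
--   # XOR R9, R15
--   r[9] = (r[9][0], r[9][1] ^ r[15][1])
--
--   # CLR R1, #$FE
--   r[1] = (r[1][0], r[1][1] & 0x01)
--
--   # XOR R14, R1
--   r[14] = (r[14][0], r[14][1] ^ r[1][1])
--
--   # MLH R9, R14
--   r[9] = (r[14][1], r[9][1])
--
--   # RET R8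
--   return r[9]
-- ===== SOURCE B (Python) =====
-- from typing import Tuple
--
--
-- def update_crc(byte: int, crc: Tuple[int, int]) -> Tuple[int, int]:
--   """Update a 16-bit CRC given a new byte (bit-serial CRC-16/CCITT, poly 0x1021)."""
--   reg = ((crc[0] & 0xff) << 8) | (crc[1] & 0xff)
--   reg ^= (byte & 0xff) << 8
--   for _ in range(8):
--     if reg & 0x8000:
--       reg = ((reg << 1) ^ 0x1021) & 0xffff
--     else:
--       reg = (reg << 1) & 0xffff
--   return (reg >> 8, reg & 0xff)
-- ===== Notes on version B (the rewrite author's own statement) =====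
-- stated objective: simpler
-- what changed: Replaced the 25-instruction IBM 5100 register-transfer emulation (nibble swaps, rotates and masked xors over a 16-register file) by the standard bit-serial CRC-16/CCITT update: assemble the 16-bit register, xor the byte into the high byte, do 8 shift-and-conditional-xor steps with polynomial 0x1021, split the register back into (high, low).
import Mathlib
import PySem

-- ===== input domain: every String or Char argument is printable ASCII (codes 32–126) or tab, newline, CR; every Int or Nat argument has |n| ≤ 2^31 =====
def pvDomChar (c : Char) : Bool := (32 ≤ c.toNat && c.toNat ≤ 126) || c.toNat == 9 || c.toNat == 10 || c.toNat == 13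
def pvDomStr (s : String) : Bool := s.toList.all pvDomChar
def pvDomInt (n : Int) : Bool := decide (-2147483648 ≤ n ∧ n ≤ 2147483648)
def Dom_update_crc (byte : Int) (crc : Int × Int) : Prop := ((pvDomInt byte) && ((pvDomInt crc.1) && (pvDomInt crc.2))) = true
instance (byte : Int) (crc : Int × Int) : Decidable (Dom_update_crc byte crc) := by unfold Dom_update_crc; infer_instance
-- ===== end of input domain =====

-- B replaces A's IBM-5100 register-transfer emulation by the standard bit-serial
-- CRC-16/CCITT (poly 0x1021) shift loop; same values everywhere, similar cost.


-- ===== PORT A =====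
-- A's mutable 16-register file is rendered as one let-binding per assignment, in
-- A's instruction order; each register holds the same (high, low) pair of ints.
-- Registers A never touches (r0, r2..r8, r11..r13) stay (0,0) and are unused.
def update_crc (byte : Int) (crc : Int × Int) : Int × Int :=
  let r9 : Int × Int := (PySem.Int.band crc.1 255, PySem.Int.band crc.2 255)
  let r10 : Int × Int := (0, PySem.Int.band byte 255)
  -- MHL R14, R9
  let r14 : Int × Int := ((0 : Int), r9.1)
  -- XOR R14, R10
  let r14 := (r14.1, PySem.Int.bxor r14.2 r10.2)
  -- MOVE R1, R14
  let r1 := r14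
  -- MOVE R15, R14
  let r15 := r14
  -- SWAP R15
  let r15 := (r15.1, PySem.Int.bor (PySem.Int.band (r15.2 <<< (4:Nat)) 255) (r15.2 >>> (4:Nat)))
  -- XOR R14, R15
  let r14 := (r14.1, PySem.Int.bxor r14.2 r15.2)
  -- CLR R14, #$0F
  let r14 := (r14.1, PySem.Int.band r14.2 240)
  -- XOR R14, R9
  let r14 := (r14.1, PySem.Int.bxor r14.2 r9.2)
  -- MOVE R9, R1
  let r9 := r1
  -- CLR R15, #$F0
  let r15 := (r15.1, PySem.Int.band r15.2 15)
  -- XOR R9, R15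
  let r9 := (r9.1, PySem.Int.bxor r9.2 r15.2)
  -- ROR3 R1
  let r1 := (r1.1, PySem.Int.bor (PySem.Int.band (r1.2 <<< (5:Nat)) 255) (r1.2 >>> (3:Nat)))
  -- MOVE R15, R1
  let r15 := r1
  -- CLR R15, #$E0
  let r15 := (r15.1, PySem.Int.band r15.2 31)
  -- XOR R14, R15
  let r14 := (r14.1, PySem.Int.bxor r14.2 r15.2)
  -- CLR R1, #$1F
  let r1 := (r1.1, PySem.Int.band r1.2 224)
  -- XOR R9, R1
  let r9 := (r9.1, PySem.Int.bxor r9.2 r1.2)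
  -- SWAP R15
  let r15 := (r15.1, PySem.Int.bor (PySem.Int.band (r15.2 <<< (4:Nat)) 255) (r15.2 >>> (4:Nat)))
  -- MOVE R1, R15
  let r1 := r15
  -- CLR R15, #$1F
  let r15 := (r15.1, PySem.Int.band r15.2 224)
  -- XOR R9, R15
  let r9 := (r9.1, PySem.Int.bxor r9.2 r15.2)
  -- CLR R1, #$FE
  let r1 := (r1.1, PySem.Int.band r1.2 1)
  -- XOR R14, R1
  let r14 := (r14.1, PySem.Int.bxor r14.2 r1.2)
  -- MLH R9, R14
  let r9 := (r14.2, r9.2)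
  r9

-- ===== PORT B =====
-- one shift-and-conditional-xor step of the CRC loop body
def crcStep (reg : Int) : Int :=
  if PySem.Int.band reg 32768 = 0 then PySem.Int.band (reg <<< (1:Nat)) 65535
  else PySem.Int.band (PySem.Int.bxor (reg <<< (1:Nat)) 4129) 65535

def update_crc_alt (byte : Int) (crc : Int × Int) : Int × Int :=
  let reg := PySem.Int.bor ((PySem.Int.band crc.1 255) <<< (8:Nat)) (PySem.Int.band crc.2 255)
  let reg := PySem.Int.bxor reg ((PySem.Int.band byte 255) <<< (8:Nat))
  let reg := (List.range 8).foldl (fun r _ => crcStep r) reg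
  (reg >>> (8:Nat), PySem.Int.band reg 255)

-- ===== PRECONDITION & SPEC =====
def Spec_update_crc (byte : Int) (crc : Int × Int) (out : Int × Int) : Prop := out = update_crc_alt byte crc
instance (byte : Int) (crc : Int × Int) (out : Int × Int) : Decidable (Spec_update_crc byte crc out) := by unfold Spec_update_crc; infer_instance

-- ===== CLAIM (what is proved, stated in full; the proofs are below) =====
def Claim_equal_update_crc : Prop := ∀ (byte : Int) (crc : Int × Int), Dom_update_crc byte crc → Spec_update_crc byte crc (update_crc byte crc)

-- ===== LEMMAS AND PROOFS =====

-- Nat shadow of A's tail (low bytes of the registers, everything after "XOR R14, R10").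
def natTail (x lo : Nat) : Nat × Nat :=
  let r15 := ((x <<< 4) &&& 255) ||| (x >>> 4)
  let r14 := x ^^^ r15
  let r14 := r14 &&& 240
  let r14 := r14 ^^^ lo
  let r9 := x
  let r15a := r15 &&& 15
  let r9 := r9 ^^^ r15a
  let r1 := ((x <<< 5) &&& 255) ||| (x >>> 3)
  let r15b := r1 &&& 31
  let r14 := r14 ^^^ r15b
  let r1a := r1 &&& 224
  let r9 := r9 ^^^ r1a
  let r15c := ((r15b <<< 4) &&& 255) ||| (r15b >>> 4)
  let r15d := r15c &&& 224
  let r9 := r9 ^^^ r15d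
  let r1b := r15c &&& 1
  let r14 := r14 ^^^ r1b
  (r14, r9)

-- Nat shadow of B's loop step and its k-fold iteration.
def natStep (reg : Nat) : Nat :=
  if reg &&& 32768 = 0 then (reg <<< 1) &&& 65535
  else ((reg <<< 1) ^^^ 4129) &&& 65535

def natIter : Nat → Nat → Nat
  | 0, r => r
  | k+1, r => natIter k (natStep r)

theorem mask255 (a : Int) : ∃ n : Nat, n < 256 ∧ PySem.Int.band a 255 = (n : Int) := by
  by_cases h : 0 ≤ a
  · refine ⟨a.toNat &&& 255, ?_, ?_⟩
    · have := Nat.and_le_right (n := a.toNat) (m := 255); omega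
    · rw [PySem.Int.band_of_nonneg h (by norm_num)]; rfl
  · refine ⟨255 - (255 &&& (-a - 1).toNat), by omega, ?_⟩
    simp [PySem.Int.band, h]

-- xor of two bytes is a byte
theorem xor_lt_256 {a b : Nat} (ha : a < 256) (hb : b < 256) : a ^^^ b < 256 :=
  Nat.xor_lt_two_pow (n := 8) ha hb

theorem testBit_ge8 {l : Nat} (hl : l < 256) {i : Nat} (hi : 8 ≤ i) : l.testBit i = false :=
  Nat.testBit_lt_two_pow (lt_of_lt_of_le hl (by
    calc (256:Nat) = 2 ^ 8 := by norm_num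
    _ ≤ 2 ^ i := Nat.pow_le_pow_right (by norm_num) hi))

theorem bridge (hn bn ln : Nat) (hl : ln < 256) :
    ((hn <<< 8) ||| ln) ^^^ (bn <<< 8) = ((hn ^^^ bn) <<< 8) ||| ln := by
  apply Nat.eq_of_testBit_eq; intro i
  by_cases hi : 8 ≤ i
  · simp [Nat.testBit_or, Nat.testBit_xor, Nat.testBit_shiftLeft, hi, testBit_ge8 hl hi]
  · simp [Nat.testBit_or, Nat.testBit_xor, Nat.testBit_shiftLeft, hi]

theorem or_eq_xor (x ln : Nat) (hl : ln < 256) : (x <<< 8) ||| ln = (x <<< 8) ^^^ ln := by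
  apply Nat.eq_of_testBit_eq; intro i
  by_cases hi : 8 ≤ i
  · simp [Nat.testBit_or, Nat.testBit_xor, Nat.testBit_shiftLeft, hi, testBit_ge8 hl hi]
  · simp [Nat.testBit_or, Nat.testBit_xor, Nat.testBit_shiftLeft, hi]

theorem and_32768_eq_zero {m : Nat} (hm : m < 32768) : m &&& 32768 = 0 := by
  apply Nat.eq_of_testBit_eq; intro i
  simp only [Nat.testBit_and, Nat.zero_testBit, Bool.and_eq_false_iff]
  by_cases h : i = 15
  · subst h
    exact Or.inl (Nat.testBit_lt_two_pow (by norm_num at hm ⊢; omega))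
  · right
    have : (32768:Nat) = 2^15 := by norm_num
    rw [this, Nat.testBit_two_pow]
    simp
    omega

theorem step_xor (reg m : Nat) (hm : m < 32768) :
    natStep (reg ^^^ m) = natStep reg ^^^ ((m <<< 1) &&& 65535) := by
  have hz : m &&& 32768 = 0 := and_32768_eq_zero hm
  have hcond : (reg ^^^ m) &&& 32768 = reg &&& 32768 := by
    rw [Nat.and_xor_distrib_right, hz, Nat.xor_zero]
  unfold natStep
  rw [hcond]
  split
  · rw [Nat.shiftLeft_xor_distrib, Nat.and_xor_distrib_right]
  · rw [Nat.shiftLeft_xor_distrib]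
    rw [show (reg <<< 1 ^^^ m <<< 1) ^^^ 4129 = (reg <<< 1 ^^^ 4129) ^^^ m <<< 1 by
      rw [Nat.xor_assoc, Nat.xor_assoc, Nat.xor_comm (m <<< 1)]]
    rw [Nat.and_xor_distrib_right]

theorem iter_xor : ∀ (k reg m : Nat), m <<< k < 65536 →
    natIter k (reg ^^^ m) = natIter k reg ^^^ (m <<< k)
  | 0, reg, m, _ => by simp [natIter]
  | k+1, reg, m, h => by
    have h2k : (2:Nat) ≤ 2 ^ (k+1) := by
      calc (2:Nat) = 2^1 := rfl
      _ ≤ 2^(k+1) := Nat.pow_le_pow_right (by norm_num) (by omega)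
    have hmk : m <<< (k+1) = m * 2 ^ (k+1) := Nat.shiftLeft_eq m (k+1)
    have hm2 : m * 2 ≤ m * 2^(k+1) := Nat.mul_le_mul_left m h2k
    have hm : m < 32768 := by nlinarith [hmk ▸ h]
    have hmask : (m <<< 1) &&& 65535 = m <<< 1 := by
      rw [show (65535:Nat) = 2^16 - 1 by norm_num, Nat.and_two_pow_sub_one_eq_mod]
      apply Nat.mod_eq_of_lt
      rw [Nat.shiftLeft_eq]; omega
    have hnext : (m <<< 1) <<< k = m <<< (k+1) := by
      rw [Nat.shiftLeft_eq, Nat.shiftLeft_eq, Nat.shiftLeft_eq, Nat.mul_assoc, ← Nat.pow_add_one']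
    show natIter k (natStep (reg ^^^ m)) = natIter k (natStep reg) ^^^ (m <<< (k+1))
    rw [step_xor reg m hm, hmask, iter_xor k (natStep reg) (m <<< 1) (by rw [hnext]; exact h), hnext]

theorem natTail_lo (x lo : Nat) : natTail x lo = ((natTail x 0).1 ^^^ lo, (natTail x 0).2) := by
  simp only [natTail, Nat.xor_zero]
  rw [Prod.mk.injEq]
  refine ⟨?_, rfl⟩
  simp [Nat.xor_comm, Nat.xor_left_comm]

set_option maxRecDepth 10000 in
theorem table256 : (List.range 256).all (fun x =>
    natTail x 0 == (natIter 8 (x <<< 8) >>> 8, natIter 8 (x <<< 8) &&& 255)) = true := by decide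

theorem lit255 : (255:Int) = ((255:Nat):Int) := rfl
theorem lit240 : (240:Int) = ((240:Nat):Int) := rfl
theorem lit15 : (15:Int) = ((15:Nat):Int) := rfl
theorem lit31 : (31:Int) = ((31:Nat):Int) := rfl
theorem lit224 : (224:Int) = ((224:Nat):Int) := rfl
theorem lit1 : (1:Int) = ((1:Nat):Int) := rfl
theorem lit32768 : (32768:Int) = ((32768:Nat):Int) := rfl
theorem lit65535 : (65535:Int) = ((65535:Nat):Int) := rfl
theorem lit4129 : (4129:Int) = ((4129:Nat):Int) := rfl

theorem A_cast (byte h l : Int) (bn hn ln : Nat)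
    (hb : PySem.Int.band byte 255 = (bn : Int)) (hh : PySem.Int.band h 255 = (hn : Int))
    (hl : PySem.Int.band l 255 = (ln : Int)) :
    update_crc byte (h, l) = (((natTail (hn ^^^ bn) ln).1 : Int), ((natTail (hn ^^^ bn) ln).2 : Int)) := by
  simp only [update_crc, hb, hh, hl]
  simp only [natTail, lit255, lit240, lit15, lit31, lit224, lit1,
    PySem.Int.bxor_natCast, PySem.Int.band_natCast, PySem.Int.bor_natCast,
    ← Int.natCast_shiftLeft, ← Int.natCast_shiftRight]

theorem crcStep_cast (n : Nat) : crcStep (n : Int) = ((natStep n : Nat) : Int) := by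
  simp only [crcStep, natStep, lit32768, lit65535, lit4129, ← Int.natCast_shiftLeft,
    PySem.Int.band_natCast, PySem.Int.bxor_natCast, Int.natCast_eq_zero]
  split_ifs <;> rfl

theorem B_cast (byte h l : Int) (bn hn ln : Nat)
    (hb : PySem.Int.band byte 255 = (bn : Int)) (hh : PySem.Int.band h 255 = (hn : Int))
    (hl : PySem.Int.band l 255 = (ln : Int)) :
    update_crc_alt byte (h, l) =
      (((natIter 8 (((hn <<< 8) ||| ln) ^^^ (bn <<< 8)) >>> 8 : Nat) : Int),
       ((natIter 8 (((hn <<< 8) ||| ln) ^^^ (bn <<< 8)) &&& 255 : Nat) : Int)) := by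
  simp only [update_crc_alt, hb, hh, hl]
  simp only [show List.range 8 = [0,1,2,3,4,5,6,7] from rfl, List.foldl, lit255, ← Int.natCast_shiftLeft, PySem.Int.bor_natCast, PySem.Int.bxor_natCast,
    crcStep_cast, PySem.Int.band_natCast, ← Int.natCast_shiftRight]
  rfl

theorem shiftLeft8_shiftRight8 (l : Nat) : (l <<< 8) >>> 8 = l := by
  rw [Nat.shiftLeft_eq, Nat.shiftRight_eq_div_pow]
  exact Nat.mul_div_cancel l (by norm_num)

theorem shiftLeft8_and_255 (l : Nat) : (l <<< 8) &&& 255 = 0 := by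
  rw [show (255:Nat) = 2^8 - 1 by norm_num, Nat.and_two_pow_sub_one_eq_mod,
    Nat.shiftLeft_eq]
  simp [Nat.mul_mod_left]

theorem table_at {x : Nat} (hx : x < 256) :
    natTail x 0 = (natIter 8 (x <<< 8) >>> 8, natIter 8 (x <<< 8) &&& 255) := by
  have h := List.all_eq_true.mp table256 x (List.mem_range.mpr hx)
  exact eq_of_beq h

theorem main_equiv (byte : Int) (crc : Int × Int) : update_crc byte crc = update_crc_alt byte crc := by
  obtain ⟨h, l⟩ := crc
  obtain ⟨bn, hbn, hb⟩ := mask255 byte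
  obtain ⟨hn, hhn, hh⟩ := mask255 h
  obtain ⟨ln, hln, hl⟩ := mask255 l
  rw [A_cast byte h l bn hn ln hb hh hl, B_cast byte h l bn hn ln hb hh hl]
  rw [bridge hn bn ln hln, or_eq_xor (hn ^^^ bn) ln hln,
    iter_xor 8 ((hn ^^^ bn) <<< 8) ln (by rw [Nat.shiftLeft_eq]; omega)]
  rw [natTail_lo (hn ^^^ bn) ln, table_at (xor_lt_256 hhn hbn)]
  rw [Nat.shiftRight_xor_distrib, Nat.and_xor_distrib_right,
    shiftLeft8_shiftRight8, shiftLeft8_and_255, Nat.xor_zero]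

-- ===== VERDICT (by name: the statement is the Claim_ definition above) =====
theorem update_crc_spec : Claim_equal_update_crc := by
  intro byte crc _
  exact main_equiv byte crc
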